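-- pv_equiv track=rewrite | github.com/Vishnuuuu24/Flood-Escape-RL-Mini-Project | experiments/run_experiments.py | _format_policy_grid
-- ===== SOURCE A (Python) =====
-- PolicyByPosition = dict[tuple[int, int], int]
--
-- ACTION_LABELS = {
--     0: "U",
--     1: "D",
--     2: "L",
--     3: "R",
-- }
--
-- def _format_policy_grid(
--     algo_name: str,
--     policy: PolicyByPosition,
--     grid_size: int,
--     goal_position: tuple[int, int],
--     scenario_label: str | None = None,
-- ) -> str:
--     header = "    " + " ".join(f"y{idx}" for idx in range(grid_size))
--     title = f"{algo_name} policy (greedy)"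
--     if scenario_label:
--         title = f"{title} - {scenario_label}"
--     lines = [title, "Legend: U=Up D=Down L=Left R=Right G=Goal .=Unknown", header]
--
--     for x in range(grid_size):
--         row_tokens: list[str] = []
--         for y in range(grid_size):
--             position = (x, y)
--             if position == goal_position:
--                 token = "G"
--             else:
--                 action = policy.get(position)
--                 token = ACTION_LABELS.get(action, ".")
--             row_tokens.append(token)
--         lines.append(f"x{x}: " + " ".join(row_tokens))
--
--     return "\n".join(lines)
-- ===== SOURCE B (Python) =====
-- ACTION_LABELS = {
--     0: "U",
--     1: "D",
--     2: "L",
--     3: "R",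
-- }
--
-- def _format_policy_grid(
--     algo_name,
--     policy,
--     grid_size,
--     goal_position,
--     scenario_label=None,
-- ):
--     grid = [["." for _ in range(grid_size)] for _ in range(grid_size)]
--     for (px, py), action in policy.items():
--         if 0 <= px < grid_size and 0 <= py < grid_size and action in ACTION_LABELS:
--             grid[px][py] = ACTION_LABELS[action]
--     gx, gy = goal_position
--     if 0 <= gx < grid_size and 0 <= gy < grid_size:
--         grid[gx][gy] = "G"
--
--     header = "    " + " ".join(f"y{idx}" for idx in range(grid_size))
--     title = f"{algo_name} policy (greedy)"
--     if scenario_label: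
--         title = f"{title} - {scenario_label}"
--     lines = [title, "Legend: U=Up D=Down L=Left R=Right G=Goal .=Unknown", header]
--     for x, row in enumerate(grid):
--         lines.append(f"x{x}: " + " ".join(row))
--     return "\n".join(lines)
-- ===== Notes on version B (the rewrite author's own statement) =====
-- stated objective: alternative
-- what changed: B builds a mutable grid initialized to '.', then makes one sparse pass over the policy dict writing action labels for in-range known actions and finally overwrites the goal cell, instead of A's dense per-cell dict lookup inside a double loop.
import Mathlib
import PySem

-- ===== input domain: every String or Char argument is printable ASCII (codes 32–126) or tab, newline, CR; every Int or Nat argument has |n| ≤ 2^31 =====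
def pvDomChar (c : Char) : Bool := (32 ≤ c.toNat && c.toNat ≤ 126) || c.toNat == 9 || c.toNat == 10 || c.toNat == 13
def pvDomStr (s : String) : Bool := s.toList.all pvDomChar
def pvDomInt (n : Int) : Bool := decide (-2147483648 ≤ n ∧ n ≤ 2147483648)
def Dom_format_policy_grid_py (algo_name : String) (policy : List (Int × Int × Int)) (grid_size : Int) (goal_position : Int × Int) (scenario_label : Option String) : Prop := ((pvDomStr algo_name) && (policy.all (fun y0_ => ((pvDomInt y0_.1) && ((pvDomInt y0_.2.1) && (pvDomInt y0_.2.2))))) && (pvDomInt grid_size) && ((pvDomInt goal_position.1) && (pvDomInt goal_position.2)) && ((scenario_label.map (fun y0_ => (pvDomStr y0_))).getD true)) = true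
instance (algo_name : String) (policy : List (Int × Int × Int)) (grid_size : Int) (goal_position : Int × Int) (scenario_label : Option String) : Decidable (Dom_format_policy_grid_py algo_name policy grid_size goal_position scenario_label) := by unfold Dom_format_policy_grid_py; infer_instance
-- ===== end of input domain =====

-- B replaces A's dense per-cell dict lookup by one sparse pass over the policy writing
-- labels into a pre-initialized grid (alternative decomposition; return value only).

-- ===== PORT A =====
-- module constant ACTION_LABELS
def pvActionLabels : PySem.Dict Int String :=
  PySem.Dict.ofList [(0, "U"), (1, "D"), (2, "L"), (3, "R")]

def format_policy_grid_py (algo_name : String) (policy : List (Int × Int × Int)) (grid_size : Int) (goal_position : Int × Int) (scenario_label : Option String) : String :=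
  -- the dict[tuple,int] parameter arrives as triples; rebuild the association dict
  let pdict : PySem.Dict (Int × Int) Int :=
    PySem.Dict.ofList (policy.map (fun t => ((t.1, t.2.1), t.2.2)))
  let header : String :=
    "    " ++ PySem.Str.join " " ((PySem.List.pyRange 0 grid_size 1).map (fun idx => "y" ++ PySem.Int.toStr idx))
  let title0 : String := algo_name ++ " policy (greedy)"
  let title : String :=
    match scenario_label with
    | some s => if s ≠ "" then title0 ++ " - " ++ s else title0
    | none => title0
  let lines : List String :=
    [title, "Legend: U=Up D=Down L=Left R=Right G=Goal .=Unknown", header]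
  let lines := lines ++ (PySem.List.pyRange 0 grid_size 1).map (fun x =>
    "x" ++ PySem.Int.toStr x ++ ": " ++ PySem.Str.join " "
      ((PySem.List.pyRange 0 grid_size 1).map (fun y =>
        if (x, y) = goal_position then "G"
        else
          match pdict.get? (x, y) with
          | some a => pvActionLabels.getD a "."
          | none => ".")))   -- ACTION_LABELS.get(None, ".") = "."
  PySem.Str.join "\n" lines

-- ===== PORT B =====
-- grid[x][y] = v for 0 ≤ x < len grid, 0 ≤ y (the only way B calls it)
def pvSet2d (g : List (List String)) (x y : Int) (v : String) : List (List String) :=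
  g.set x.toNat ((g.getD x.toNat []).set y.toNat v)

def pvStepB (grid_size : Int) (g : List (List String)) (t : (Int × Int) × Int) : List (List String) :=
  if 0 ≤ t.1.1 ∧ t.1.1 < grid_size ∧ 0 ≤ t.1.2 ∧ t.1.2 < grid_size ∧ pvActionLabels.contains t.2 then
    pvSet2d g t.1.1 t.1.2 (pvActionLabels.getD t.2 ".")
  else g

def format_policy_grid_py_alt (algo_name : String) (policy : List (Int × Int × Int)) (grid_size : Int) (goal_position : Int × Int) (scenario_label : Option String) : String :=
  let pdict : PySem.Dict (Int × Int) Int :=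
    PySem.Dict.ofList (policy.map (fun t => ((t.1, t.2.1), t.2.2)))
  -- [['.' for _ in range(grid_size)] for _ in range(grid_size)]
  let grid0 : List (List String) :=
    List.replicate grid_size.toNat (List.replicate grid_size.toNat ".")
  let grid1 := pdict.items.foldl (pvStepB grid_size) grid0
  let grid2 :=
    if 0 ≤ goal_position.1 ∧ goal_position.1 < grid_size ∧ 0 ≤ goal_position.2 ∧ goal_position.2 < grid_size then
      pvSet2d grid1 goal_position.1 goal_position.2 "G"
    else grid1
  let header : String :=
    "    " ++ PySem.Str.join " " ((PySem.List.pyRange 0 grid_size 1).map (fun idx => "y" ++ PySem.Int.toStr idx))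
  let title0 : String := algo_name ++ " policy (greedy)"
  let title : String :=
    match scenario_label with
    | some s => if s ≠ "" then title0 ++ " - " ++ s else title0
    | none => title0
  let lines : List String :=
    [title, "Legend: U=Up D=Down L=Left R=Right G=Goal .=Unknown", header]
  let lines := lines ++ (PySem.List.enumerate grid2 0).map (fun p =>
    "x" ++ PySem.Int.toStr p.1 ++ ": " ++ PySem.Str.join " " p.2)
  PySem.Str.join "\n" lines

-- ===== PRECONDITION & SPEC =====
def Spec_format_policy_grid_py (algo_name : String) (policy : List (Int × Int × Int)) (grid_size : Int) (goal_position : Int × Int) (scenario_label : Option String) (out : String) : Prop := out = format_policy_grid_py_alt algo_name policy grid_size goal_position scenario_label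
instance (algo_name : String) (policy : List (Int × Int × Int)) (grid_size : Int) (goal_position : Int × Int) (scenario_label : Option String) (out : String) : Decidable (Spec_format_policy_grid_py algo_name policy grid_size goal_position scenario_label out) := by unfold Spec_format_policy_grid_py; infer_instance

-- ===== CLAIM (what is proved, stated in full; the proofs are below) =====
def Claim_equal_format_policy_grid_py : Prop := ∀ (algo_name : String) (policy : List (Int × Int × Int)) (grid_size : Int) (goal_position : Int × Int) (scenario_label : Option String), Dom_format_policy_grid_py algo_name policy grid_size goal_position scenario_label → Spec_format_policy_grid_py algo_name policy grid_size goal_position scenario_label (format_policy_grid_py algo_name policy grid_size goal_position scenario_label)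

-- ===== LEMMAS AND PROOFS =====

-- the cell as read back by B's printing phase
def pvCell (g : List (List String)) (x y : Nat) : String := (g.getD x []).getD y "."

def pvDims (g : List (List String)) (n : Nat) : Prop :=
  g.length = n ∧ ∀ r ∈ g, r.length = n

lemma pvDims_set2d {g : List (List String)} {n : Nat} (hd : pvDims g n) (a b : Int)
    (ha : a.toNat < n) (v : String) :
    pvDims (pvSet2d g a b v) n := by
  obtain ⟨hl, hr⟩ := hd
  refine ⟨by simpa [pvSet2d] using hl, ?_⟩
  intro r hrmem
  rcases List.mem_or_eq_of_mem_set hrmem with h | h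
  · exact hr r h
  · subst h
    rw [List.length_set]
    have hx : a.toNat < g.length := by omega
    have : g.getD a.toNat [] = g[a.toNat] := List.getD_eq_getElem g [] hx
    rw [this]; exact hr _ (List.getElem_mem hx)

lemma pvCell_set2d {g : List (List String)} {n : Nat} (hd : pvDims g n)
    (a b : Int) (han : a.toNat < n) (hbn : b.toNat < n) (v : String)
    (x y : Nat) (hx : x < n) :
    pvCell (pvSet2d g a b v) x y = if a.toNat = x ∧ b.toNat = y then v else pvCell g x y := by
  obtain ⟨hl, hr⟩ := hd
  have hxg : x < g.length := by omega
  have hag : a.toNat < g.length := by omega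
  by_cases hax : a.toNat = x
  · subst hax
    have h1 : (pvSet2d g a b v).getD a.toNat [] = (g[a.toNat]).set b.toNat v := by
      simp [pvSet2d, List.getD_eq_getElem?_getD, List.getElem?_set_self hag,
        List.getElem?_eq_getElem hag]
    have hrow : (g[a.toNat]).length = n := hr _ (List.getElem_mem hag)
    simp only [pvCell, h1, List.getD_eq_getElem g [] hag]
    by_cases hby : b.toNat = y
    · subst hby
      simp [List.getD_eq_getElem?_getD, List.getElem?_set_self (by omega : b.toNat < (g[a.toNat]).length)]
    · simp [List.getD_eq_getElem?_getD, List.getElem?_set_ne (by omega : b.toNat ≠ y), hby]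
  · simp only [pvCell, pvSet2d, List.getD_eq_getElem?_getD]
    rw [List.getElem?_set_ne hax]
    simp [hax]

lemma pvDims_fold {grid_size : Int} {n : Nat} (hn : n = grid_size.toNat)
    (items : List ((Int × Int) × Int)) (g : List (List String)) (hd : pvDims g n) :
    pvDims (items.foldl (pvStepB grid_size) g) n := by
  induction items generalizing g with
  | nil => exact hd
  | cons t rest ih =>
    refine ih _ ?_
    unfold pvStepB
    split_ifs with h
    · exact pvDims_set2d hd _ _ (by omega) _
    · exact hd

lemma pvCell_fold {grid_size : Int} {n : Nat} (hn : n = grid_size.toNat)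
    (items : List ((Int × Int) × Int)) (hnd : (items.map Prod.fst).Nodup)
    (g : List (List String)) (hd : pvDims g n)
    (x y : Nat) (hx : x < n) (hy : y < n) :
    pvCell (items.foldl (pvStepB grid_size) g) x y =
      match items.find? (fun t => t.1 == ((x : Int), (y : Int))) with
      | some t => if pvActionLabels.contains t.2 then pvActionLabels.getD t.2 "." else pvCell g x y
      | none => pvCell g x y := by
  revert hnd
  induction items generalizing g with
  | nil => intro _; simp
  | cons t rest ih =>
    intro hnd
    have hnd' : (rest.map Prod.fst).Nodup := (List.nodup_cons.mp (by simpa using hnd)).2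
    have hmem : t.1 ∉ rest.map Prod.fst := (List.nodup_cons.mp (by simpa using hnd)).1
    have hdims' : pvDims (pvStepB grid_size g t) n := by
      unfold pvStepB
      split_ifs with h
      · exact pvDims_set2d hd _ _ (by omega) _
      · exact hd
    by_cases hb : t.1 = ((x : Int), (y : Int))
    · have hfind : rest.find? (fun u => u.1 == ((x : Int), (y : Int))) = none := by
        rw [List.find?_eq_none]
        intro u hu hueq
        apply hmem
        have hu1 : u.1 = ((x : Int), (y : Int)) := by simpa using hueq
        rw [hb, ← hu1]
        exact List.mem_map_of_mem hu
      simp only [List.foldl_cons]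
      rw [ih _ hdims' hnd', hfind]
      rw [List.find?_cons_of_pos (by simpa using hb)]
      have hx1 : t.1.1 = ((x : Int)) := by rw [hb]
      have hy1 : t.1.2 = ((y : Int)) := by rw [hb]
      simp only [pvStepB, hx1, hy1]
      by_cases hc : pvActionLabels.contains t.2 = true
      · rw [if_pos ⟨by omega, by omega, by omega, by omega, hc⟩, if_pos hc]
        rw [pvCell_set2d hd _ _ (by omega) (by omega) _ _ _ hx]
        simp
      · rw [if_neg (by simp [hc]), if_neg (by simp [hc])]
    · have hcg : pvCell (pvStepB grid_size g t) x y = pvCell g x y := by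
        unfold pvStepB
        split_ifs with h
        · rw [pvCell_set2d hd _ _ (by omega) (by omega) _ _ _ hx]
          rw [if_neg]
          intro ⟨h1, h2⟩
          apply hb
          have : t.1.1 = ((x : Int)) := by omega
          have : t.1.2 = ((y : Int)) := by omega
          exact Prod.ext (by omega) (by omega)
        · rfl
      simp only [List.foldl_cons]
      rw [ih _ hdims' hnd', hcg]
      rw [List.find?_cons_of_neg (by simpa using hb)]

lemma pvToken_eq (pdict : PySem.Dict (Int × Int) Int) (hnd : pdict.keys.Nodup) (kk : Int × Int) :
    (match pdict.items.find? (fun u => u.1 == kk) with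
     | some t => if pvActionLabels.contains t.2 then pvActionLabels.getD t.2 "." else "."
     | none => ".") =
    (match pdict.get? kk with
     | some a => pvActionLabels.getD a "."
     | none => ".") := by
  cases hf : pdict.items.find? (fun u => u.1 == kk) with
  | none =>
    have hnone : pdict.get? kk = none := by
      rw [PySem.Dict.get?_eq_none_iff_not_mem_keys]
      intro hk
      simp only [PySem.Dict.keys] at hk
      obtain ⟨u, hu, hu1⟩ := List.mem_map.mp hk
      have := List.find?_eq_none.mp hf u hu
      simp [hu1] at this
    rw [hnone]
  | some t =>
    have hp := List.find?_some hf
    have ht1 : t.1 = kk := by simpa using hp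
    have htm : t ∈ pdict.items := List.mem_of_find?_eq_some hf
    have hget : pdict.get? kk = some t.2 := by
      have : (kk, t.2) ∈ pdict.items := by
        rw [← ht1]; exact htm
      exact PySem.Dict.get?_of_mem_items pdict this hnd
    rw [hget]
    by_cases hc : pvActionLabels.contains t.2 = true
    · simp [hc]
    · have h0 : pvActionLabels.getD t.2 "." = "." :=
        PySem.Dict.getD_of_not_contains pvActionLabels "." (by simpa using hc)
      simp [hc, h0]

lemma pvCell_grid2 (policy : List (Int × Int × Int)) (gs : Int) (goal : Int × Int)
    (x y : Nat) (hx : x < gs.toNat) (hy : y < gs.toNat) :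
    pvCell
      (if 0 ≤ goal.1 ∧ goal.1 < gs ∧ 0 ≤ goal.2 ∧ goal.2 < gs then
        pvSet2d ((PySem.Dict.ofList (policy.map (fun t => ((t.1, t.2.1), t.2.2)))).items.foldl (pvStepB gs)
            (List.replicate gs.toNat (List.replicate gs.toNat "."))) goal.1 goal.2 "G"
       else ((PySem.Dict.ofList (policy.map (fun t => ((t.1, t.2.1), t.2.2)))).items.foldl (pvStepB gs)
            (List.replicate gs.toNat (List.replicate gs.toNat ".")))) x y =
    (if (((x : Int)), ((y : Int))) = goal then "G"
     else match (PySem.Dict.ofList (policy.map (fun t => ((t.1, t.2.1), t.2.2)))).get? (((x : Int)), ((y : Int))) with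
       | some a => pvActionLabels.getD a "."
       | none => ".") := by
  set pdict := PySem.Dict.ofList (policy.map (fun t => ((t.1, t.2.1), t.2.2))) with hpd
  have hd0 : pvDims (List.replicate gs.toNat (List.replicate gs.toNat ".")) gs.toNat := by
    constructor
    · simp
    · intro r hr
      rw [List.eq_of_mem_replicate hr]
      simp
  have hd1 : pvDims (pdict.items.foldl (pvStepB gs) (List.replicate gs.toNat (List.replicate gs.toNat "."))) gs.toNat :=
    pvDims_fold rfl _ _ hd0
  have hnd : (pdict.items.map Prod.fst).Nodup := by
    have := PySem.Dict.nodup_keys_ofList (policy.map (fun t => ((t.1, t.2.1), t.2.2)))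
    simpa [PySem.Dict.keys] using this
  have hcell0 : pvCell (List.replicate gs.toNat (List.replicate gs.toNat ".")) x y = "." := by
    simp [pvCell, List.getD_eq_getElem?_getD, hx, hy]
  have hcell1 : pvCell (pdict.items.foldl (pvStepB gs) (List.replicate gs.toNat (List.replicate gs.toNat "."))) x y =
      (match pdict.get? (((x : Int)), ((y : Int))) with
       | some a => pvActionLabels.getD a "."
       | none => ".") := by
    rw [pvCell_fold rfl _ hnd _ hd0 x y hx hy]
    rw [← pvToken_eq pdict (by simpa [PySem.Dict.keys] using hnd) (((x : Int)), ((y : Int)))]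
    rw [hcell0]
  by_cases hG : 0 ≤ goal.1 ∧ goal.1 < gs ∧ 0 ≤ goal.2 ∧ goal.2 < gs
  · rw [if_pos hG, pvCell_set2d hd1 _ _ (by omega) (by omega) _ _ _ hx]
    by_cases heq : ((((x : Int)), ((y : Int))) : Int × Int) = goal
    · have hg1 : goal.1 = ((x : Int)) := by rw [← heq]
      have hg2 : goal.2 = ((y : Int)) := by rw [← heq]
      rw [if_pos ⟨by omega, by omega⟩, if_pos heq]
    · have hne : ¬(goal.1.toNat = x ∧ goal.2.toNat = y) := by
        intro ⟨h1, h2⟩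
        apply heq
        obtain ⟨hg1, hg2, hg3, hg4⟩ := hG
        have hgoal : goal = ((((x : Int)), ((y : Int))) : Int × Int) := by
          rw [Prod.ext_iff]
          refine ⟨?_, ?_⟩ <;> omega
        rw [hgoal]
      rw [if_neg hne, if_neg heq, hcell1]
  · have hne : ¬(((((x : Int)), ((y : Int))) : Int × Int) = goal) := by
      intro heq
      apply hG
      rw [← heq]
      refine ⟨?_, ?_, ?_, ?_⟩ <;> simp <;> omega
    rw [if_neg hG, hcell1, if_neg hne]

-- ===== VERDICT (by name: the statement is the Claim_ definition above) =====
theorem format_policy_grid_py_spec : Claim_equal_format_policy_grid_py := by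
  intro algo policy gs goal lab _
  unfold Spec_format_policy_grid_py format_policy_grid_py format_policy_grid_py_alt
  simp only []
  apply congrArg
  apply congrArg
  have hd0 : pvDims (List.replicate gs.toNat (List.replicate gs.toNat ".")) gs.toNat := by
    constructor
    · simp
    · intro r hr
      rw [List.eq_of_mem_replicate hr]
      simp
  have hd1 : pvDims
      (List.foldl (pvStepB gs) (List.replicate gs.toNat (List.replicate gs.toNat "."))
        (PySem.Dict.ofList (List.map (fun t => ((t.1, t.2.1), t.2.2)) policy)).items) gs.toNat :=
    pvDims_fold rfl _ _ hd0
  set grid2 := (if 0 ≤ goal.1 ∧ goal.1 < gs ∧ 0 ≤ goal.2 ∧ goal.2 < gs then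
          pvSet2d
            (List.foldl (pvStepB gs) (List.replicate gs.toNat (List.replicate gs.toNat "."))
              (PySem.Dict.ofList (List.map (fun t => ((t.1, t.2.1), t.2.2)) policy)).items)
            goal.1 goal.2 "G"
        else
          List.foldl (pvStepB gs) (List.replicate gs.toNat (List.replicate gs.toNat "."))
            (PySem.Dict.ofList (List.map (fun t => ((t.1, t.2.1), t.2.2)) policy)).items) with hg2
  have hd2 : pvDims grid2 gs.toNat := by
    rw [hg2]
    split_ifs with h
    · exact pvDims_set2d hd1 _ _ (by omega) _
    · exact hd1
  rw [PySem.List.enumerate_eq_map_pyRange (xs := grid2) (d := ([] : List String)), List.map_map]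
  have hrange : PySem.List.pyRange 0 (PySem.List.len grid2) 1 = PySem.List.pyRange 0 gs 1 := by
    have hlen : PySem.List.len grid2 = ((gs.toNat : Int)) := by
      simp [PySem.List.len_eq, hd2.1]
    rw [hlen]
    by_cases hpos : 0 ≤ gs
    · rw [Int.toNat_of_nonneg hpos]
    · rw [PySem.List.pyRange_one_eq_nil (by omega), PySem.List.pyRange_one_eq_nil (by omega)]
  rw [hrange]
  apply List.map_congr_left
  intro j hj
  rw [PySem.List.mem_pyRange_one] at hj
  simp only [Function.comp]
  apply congrArg
  have hjn : j.toNat < gs.toNat := by omega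
  have hjrow : PySem.List.pyGetD grid2 j [] = grid2[j.toNat]'(by rw [hd2.1]; omega) := by
    rw [PySem.List.pyGetD_of_nonneg grid2 ([] : List String) hj.1]
    rw [List.getD_eq_getElem]
  rw [hjrow]
  apply congrArg
  have hjg : j.toNat < grid2.length := by rw [hd2.1]; omega
  have hrowlen : (grid2[j.toNat]'hjg).length = gs.toNat := hd2.2 _ (List.getElem_mem hjg)
  apply List.ext_getElem
  · rw [List.length_map, PySem.List.length_pyRange_one, hrowlen]
    omega
  · intro k h1 h2
    have hk : k < gs.toNat := by
      rw [List.length_map, PySem.List.length_pyRange_one] at h1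
      omega
    rw [List.getElem_map, PySem.List.getElem_pyRange_one]
    have hcell : (grid2[j.toNat]'hjg)[k]'h2 = pvCell grid2 j.toNat k := by
      simp [pvCell, List.getD_eq_getElem?_getD, List.getElem?_eq_getElem hjg,
        List.getElem?_eq_getElem h2]
    rw [hcell, pvCell_grid2 policy gs goal j.toNat k hjn hk]
    have hjcast : ((j.toNat : Int)) = j := Int.toNat_of_nonneg hj.1
    rw [hjcast]
    norm_num
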